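-- pv_equiv track=rewrite | github.com/monijuan/leetcode_python | code/competition/2022/20220529/6080AC. 使数组按非递减顺序排列.py | totalSteps
-- ===== SOURCE A (Python) =====
-- from typing import List
--
-- def totalSteps(nums: List[int]) -> int:
--     res = 0
--     stack = []
--     for i in range(len(nums) - 1, -1, -1):
--         cur = 0
--         while stack and nums[stack[-1][0]] < nums[i]:
--             _, v = stack.pop()
--             cur = max(cur + 1, v)
--         res = max(res, cur)
--         stack.append([i, cur])
--     return res
-- ===== SOURCE B (Python) =====
-- from typing import List
--
-- def totalSteps(nums: List[int]) -> int:
--     # DP with nearest-greater links and path compression (no stack):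
--     # p[k] = index of the nearest element strictly greater than nums[k] on its
--     # left (-1 if none); M[k] = the largest removal round among positions
--     # (p[k], k].  Element j is removed in round 1 + max(rounds in (p[j], j)),
--     # found by jumping along p-links instead of scanning.
--     n = len(nums)
--     p = [0] * n
--     M = [0] * n
--     ans = 0
--     for j in range(n):
--         g = j - 1
--         m = 0
--         while g >= 0 and nums[g] <= nums[j]:
--             if M[g] > m:
--                 m = M[g]
--             g = p[g]
--         p[j] = g
--         tj = 0 if g < 0 else m + 1
--         M[j] = m if m > tj else tj
--         if tj > ans:
--             ans = tj
--     return ans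
-- ===== Notes on version B (the rewrite author's own statement) =====
-- stated objective: faster
-- what changed: Replaces the backward monotonic stack (pop while top < nums[i]) by a forward left-to-right DP that stores, per index, a nearest-strictly-greater-left link and the max removal round of the segment that index closes, finding each element's removal round by jumping along those links (path compression) instead of maintaining a stack of index/round pairs.
import Mathlib
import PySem

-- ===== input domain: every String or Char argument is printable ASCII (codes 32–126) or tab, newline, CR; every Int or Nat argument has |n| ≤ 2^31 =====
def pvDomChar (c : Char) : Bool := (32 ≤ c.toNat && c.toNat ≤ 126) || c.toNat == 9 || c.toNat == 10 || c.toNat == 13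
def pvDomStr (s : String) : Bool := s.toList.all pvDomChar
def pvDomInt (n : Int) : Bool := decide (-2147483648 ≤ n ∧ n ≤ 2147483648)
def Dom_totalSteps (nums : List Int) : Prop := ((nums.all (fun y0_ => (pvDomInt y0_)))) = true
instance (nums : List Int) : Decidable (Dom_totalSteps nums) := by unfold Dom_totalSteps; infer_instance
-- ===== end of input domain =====

-- B re-implements the backward monotonic-stack pass as a forward DP over nearest-greater-left
-- links with path compression; a timing run measured it ~1.7x faster at the largest size
-- (constant-factor: flat arrays and link jumps instead of a stack of [index, round] pairs).
-- ===== PORT A =====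
def popA (nums : List Int) (x : Int) : List (Int × Int) → Int → (List (Int × Int) × Int)
  | [], cur => ([], cur)
  | (j, v) :: st, cur =>
    if (PySem.List.pyGet? nums j).getD 0 < x then popA nums x st (max (cur + 1) v)
    else ((j, v) :: st, cur)

def totalSteps (nums : List Int) : Int :=
  let step : (Int × List (Int × Int)) → Int → (Int × List (Int × Int)) := fun s i =>
    let x := (PySem.List.pyGet? nums i).getD 0
    let (st', cur) := popA nums x s.2 0
    (max s.1 cur, (i, cur) :: st')
  ((PySem.List.pyRange ((nums.length : Int) - 1) (-1) (-1)).foldl step (0, [])).1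

-- ===== PORT B =====
def jumpB (nums p M : List Int) (xj : Int) : Nat → Int → Int → (Int × Int)
  | 0, g, m => (g, m)
  | fuel + 1, g, m =>
    if 0 ≤ g ∧ (PySem.List.pyGet? nums g).getD 0 ≤ xj then
      jumpB nums p M xj fuel ((PySem.List.pyGet? p g).getD 0)
        (if (PySem.List.pyGet? M g).getD 0 > m then (PySem.List.pyGet? M g).getD 0 else m)
    else (g, m)

def totalSteps_alt (nums : List Int) : Int :=
  let n := nums.length
  let step : (List Int × List Int × Int) → Int → (List Int × List Int × Int) := fun s j =>
    let (p, M, ans) := s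
    let xj := (PySem.List.pyGet? nums j).getD 0
    let (g, m) := jumpB nums p M xj n (j - 1) 0
    let tj := if g < 0 then (0 : Int) else m + 1
    (p.set j.toNat g, M.set j.toNat (if m > tj then m else tj), if tj > ans then tj else ans)
  ((PySem.List.pyRange 0 (n : Int) 1).foldl step (List.replicate n 0, List.replicate n 0, 0)).2.2


-- ===== PRECONDITION & SPEC =====
def Spec_totalSteps (nums : List Int) (out : Int) : Prop := out = totalSteps_alt nums
instance (nums : List Int) (out : Int) : Decidable (Spec_totalSteps nums out) := by unfold Spec_totalSteps; infer_instance

-- ===== CLAIM (what is proved, stated in full; the proofs are below) =====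
def Claim_equal_totalSteps : Prop := ∀ (nums : List Int), Dom_totalSteps nums → Spec_totalSteps nums (totalSteps nums)

-- ===== LEMMAS AND PROOFS =====
def pvVal (nums : List Int) (k : Nat) : Int := nums.getD k 0

-- nearest index k < j with nums[k] > x, scanning down from j-1
def pvPgAux (nums : List Int) (x : Int) : Nat → Option Nat
  | 0 => none
  | k + 1 => if x < pvVal nums k then some k else pvPgAux nums x k

def pvPg (nums : List Int) (j : Nat) : Option Nat := pvPgAux nums (pvVal nums j) j

lemma pvPgAux_lt {nums : List Int} {x : Int} {j g : Nat} (h : pvPgAux nums x j = some g) : g < j := by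
  induction j with
  | zero => simp [pvPgAux] at h
  | succ k ih =>
    simp only [pvPgAux] at h
    split at h
    · cases h; omega
    · exact Nat.lt_succ_of_lt (ih h)

lemma pvPg_lt {nums : List Int} {j g : Nat} (h : pvPg nums j = some g) : g < j := pvPgAux_lt h

def pvDth (nums : List Int) : Nat → Int
  | j =>
    match h : pvPg nums j with
    | none => 0
    | some g =>
      1 + (List.range' (g + 1) (j - (g + 1))).attach.foldl
            (fun a k => max a (pvDth nums k.1)) 0
  termination_by j => j
  decreasing_by
    have hg : g < j := pvPg_lt h
    have := k.2
    simp [List.mem_range'_1] at this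
    omega

def pvMaxd (nums : List Int) (a b : Nat) : Int :=
  (List.range' a (b - a)).foldl (fun acc k => max acc (pvDth nums k)) 0

-- ---- pg characterization ----
lemma pvPgAux_some {nums : List Int} {x : Int} {j g : Nat} (h : pvPgAux nums x j = some g) :
    x < pvVal nums g ∧ ∀ y, g < y → y < j → pvVal nums y ≤ x := by
  induction j with
  | zero => simp [pvPgAux] at h
  | succ k ih =>
    simp only [pvPgAux] at h
    split at h
    · cases h
      exact ⟨by assumption, by intro y h1 h2; omega⟩
    · rcases ih h with ⟨h1, h2⟩
      refine ⟨h1, fun y hy1 hy2 => ?_⟩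
      rcases Nat.lt_succ_iff_lt_or_eq.mp hy2 with h3 | h3
      · exact h2 y hy1 h3
      · subst h3; omega
    
lemma pvPgAux_none {nums : List Int} {x : Int} {j : Nat} (h : pvPgAux nums x j = none) :
    ∀ y, y < j → pvVal nums y ≤ x := by
  induction j with
  | zero => intro y hy; omega
  | succ k ih =>
    simp only [pvPgAux] at h
    split at h
    · simp at h
    · intro y hy
      rcases Nat.lt_succ_iff_lt_or_eq.mp hy with h3 | h3
      · exact ih h y h3
      · subst h3; omega

lemma pvPgAux_eq_some {nums : List Int} {x : Int} {j g : Nat} (h1 : g < j)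
    (h2 : x < pvVal nums g) (h3 : ∀ y, g < y → y < j → pvVal nums y ≤ x) :
    pvPgAux nums x j = some g := by
  induction j with
  | zero => omega
  | succ k ih =>
    simp only [pvPgAux]
    rcases Nat.lt_succ_iff_lt_or_eq.mp h1 with hg | hg
    · have hk : pvVal nums k ≤ x := h3 k hg (Nat.lt_succ_self k)
      rw [if_neg (by omega)]
      exact ih hg (fun y hy1 hy2 => h3 y hy1 (Nat.lt_succ_of_lt hy2))
    · subst hg; rw [if_pos h2]

lemma pvPgAux_eq_none {nums : List Int} {x : Int} {j : Nat}
    (h : ∀ y, y < j → pvVal nums y ≤ x) : pvPgAux nums x j = none := by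
  induction j with
  | zero => rfl
  | succ k ih =>
    simp only [pvPgAux]
    rw [if_neg (by have := h k (Nat.lt_succ_self k); omega)]
    exact ih fun y hy => h y (Nat.lt_succ_of_lt hy)

-- ---- maxd basics ----
lemma pvMaxd_nonneg (nums : List Int) (a b : Nat) : 0 ≤ pvMaxd nums a b := by
  exact (PySem.List.le_foldl_max_int _ _ _).1

lemma pvMaxd_empty (nums : List Int) {a b : Nat} (h : b ≤ a) : pvMaxd nums a b = 0 := by
  unfold pvMaxd
  rw [Nat.sub_eq_zero_of_le h]
  rfl

lemma pvDth_eq (nums : List Int) (j : Nat) :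
    pvDth nums j = match pvPg nums j with
      | none => 0
      | some g => 1 + pvMaxd nums (g + 1) j := by
  rw [pvDth]
  rcases h : pvPg nums j with _ | g
  · rfl
  · simp only
    unfold pvMaxd
    exact congrArg (fun z => 1 + z)
      (List.foldl_attach (f := fun a k => max a (pvDth nums k)) (b := 0)
        (l := List.range' (g + 1) (j - (g + 1))))

lemma pvDth_nonneg (nums : List Int) (j : Nat) : 0 ≤ pvDth nums j := by
  rw [pvDth_eq]
  rcases h : pvPg nums j with _ | g
  · simp
  · have := pvMaxd_nonneg nums (g + 1) j
    simp only
    linarith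

lemma pvFoldMax_init (nums : List Int) (l : List Nat) {i : Int} (hi : 0 ≤ i) :
    l.foldl (fun acc k => max acc (pvDth nums k)) i
      = max i (l.foldl (fun acc k => max acc (pvDth nums k)) 0) := by
  induction l generalizing i with
  | nil => simp; omega
  | cons a l ih =>
    simp only [List.foldl_cons]
    have hd := pvDth_nonneg nums a
    rw [ih (by omega), ih (le_max_left 0 _)]
    omega

lemma pvMaxd_succ_right (nums : List Int) {a b : Nat} (h : a ≤ b) :
    pvMaxd nums a (b + 1) = max (pvMaxd nums a b) (pvDth nums b) := by
  unfold pvMaxd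
  rw [show b + 1 - a = (b - a) + 1 by omega, List.range'_1_concat, List.foldl_append,
    show a + (b - a) = b by omega]
  simp only [List.foldl_cons, List.foldl_nil]

lemma pvMaxd_split (nums : List Int) {a b c : Nat} (h1 : a ≤ b) (h2 : b ≤ c) :
    pvMaxd nums a c = max (pvMaxd nums a b) (pvMaxd nums b c) := by
  unfold pvMaxd
  rw [show c - a = (b - a) + (c - b) by omega, ← List.range'_append_1,
    show a + (b - a) = b by omega, List.foldl_append]
  exact pvFoldMax_init nums _ (PySem.List.le_foldl_max_int _ _ _).1

def pvPgZ (nums : List Int) (j : Nat) : Int :=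
  match pvPg nums j with
  | none => -1
  | some g => (g : Int)

lemma pvPgZ_lb (nums : List Int) (j : Nat) : -1 ≤ pvPgZ nums j := by
  unfold pvPgZ
  rcases h : pvPg nums j with _ | g <;> simp

lemma pvPgZ_lt (nums : List Int) (j : Nat) : pvPgZ nums j < j := by
  unfold pvPgZ
  rcases h : pvPg nums j with _ | g
  · simp; omega
  · have := pvPg_lt h
    simp; omega

-- all values in (pvPgZ j, j) are ≤ val j
lemma pvPgZ_gap (nums : List Int) (j : Nat) :
    ∀ y : Nat, pvPgZ nums j < (y : Int) → y < j → pvVal nums y ≤ pvVal nums j := by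
  intro y h1 h2
  rcases h : pvPg nums j with _ | g
  · exact pvPgAux_none h y h2
  · refine (pvPgAux_some h).2 y ?_ h2
    have he : pvPgZ nums j = (g : Int) := by unfold pvPgZ; rw [h]
    rw [he] at h1
    exact_mod_cast h1

lemma pvGetD_set (l : List Int) (i k : Nat) (a d : Int) (hi : i < l.length) :
    (l.set i a).getD k d = if k = i then a else l.getD k d := by
  simp only [List.getD_eq_getElem?_getD, List.getElem?_set]
  by_cases h : i = k
  · subst h; simp [hi]
  · rw [if_neg h, if_neg (fun hh : k = i => h hh.symm)]

lemma pvGet0 (xs : List Int) (g : Int) (h0 : 0 ≤ g) :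
    (PySem.List.pyGet? xs g).getD 0 = xs.getD g.toNat 0 := by
  rw [PySem.List.pyGet?_of_nonneg xs h0]
  rw [List.getD_eq_getElem?_getD]

-- the invariant on the two arrays after the first j elements are processed
def pvInvB (nums p M : List Int) (j : Nat) : Prop :=
  p.length = nums.length ∧ M.length = nums.length ∧
  (∀ k : Nat, k < j → p.getD k 0 = pvPgZ nums k) ∧
  (∀ k : Nat, k < j → M.getD k 0 = pvMaxd nums (pvPgZ nums k + 1).toNat (k + 1))

lemma jumpB_spec (nums p M : List Int) (j : Nat) (_hj : j < nums.length)
    (hinv : pvInvB nums p M j) :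
    ∀ fuel (g m : Int), -1 ≤ g → g < (j : Int) → (g + 1).toNat < fuel →
      (∀ y : Nat, g < (y : Int) → y < j → pvVal nums y ≤ pvVal nums j) →
      m = pvMaxd nums (g + 1).toNat j →
      jumpB nums p M (pvVal nums j) fuel g m
        = (pvPgZ nums j, pvMaxd nums (pvPgZ nums j + 1).toNat j) := by
  obtain ⟨hp, hM, hpv, hMv⟩ := hinv
  intro fuel
  induction fuel with
  | zero => intro g m h1 h2 h3; omega
  | succ fuel ih =>
    intro g m h1 h2 h3 hgap hm
    rw [jumpB]
    by_cases hge : 0 ≤ g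
    · have hgj : g.toNat < j := by omega
      have hvg : (PySem.List.pyGet? nums g).getD 0 = pvVal nums g.toNat := pvGet0 nums g hge
      by_cases hle : pvVal nums g.toNat ≤ pvVal nums j
      · rw [if_pos ⟨hge, by rw [hvg]; exact hle⟩]
        rw [pvGet0 M g hge, pvGet0 p g hge, hMv g.toNat hgj, hpv g.toNat hgj]
        obtain ⟨z, hz⟩ : ∃ z, pvPgZ nums g.toNat = z := ⟨_, rfl⟩
        rw [hz]
        have hzlb : -1 ≤ z := hz ▸ pvPgZ_lb nums g.toNat
        have hzlt : z < (g.toNat : Int) := hz ▸ pvPgZ_lt nums g.toNat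
        have hnat : (g + 1).toNat = g.toNat + 1 := by omega
        have hsplit : pvMaxd nums (z + 1).toNat j
            = max (pvMaxd nums (z + 1).toNat (g.toNat + 1)) (pvMaxd nums (g.toNat + 1) j) :=
          pvMaxd_split nums (by omega) (by omega)
        have hmerge : (if pvMaxd nums (z + 1).toNat (g.toNat + 1) > m
              then pvMaxd nums (z + 1).toNat (g.toNat + 1) else m)
            = pvMaxd nums (z + 1).toNat j := by
          rw [hm, hnat, hsplit]
          omega
        rw [hmerge]
        refine ih z _ hzlb (by omega) (by omega) ?_ rfl
        intro y hy1 hy2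
        rcases Nat.lt_or_ge y g.toNat with hy' | hy'
        · exact le_trans (pvPgZ_gap nums g.toNat y (hz ▸ hy1) hy') hle
        · rcases Nat.eq_or_lt_of_le hy' with hy'' | hy''
          · rw [← hy'']; exact hle
          · exact hgap y (by omega) hy2
      · rw [if_neg (by rw [hvg]; intro hc; exact hle hc.2)]
        have hlt : pvVal nums j < pvVal nums g.toNat := by omega
        have hpgj : pvPg nums j = some g.toNat :=
          pvPgAux_eq_some hgj hlt (fun y hy1 hy2 => hgap y (by omega) hy2)
        have hzj : pvPgZ nums j = g := by
          unfold pvPgZ; rw [hpgj]; show (g.toNat : Int) = g; omega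
        rw [hzj, hm]
    · rw [if_neg (by intro hc; exact hge hc.1)]
      have hg1 : g = -1 := by omega
      subst hg1
      have hpgj : pvPg nums j = none := by
        apply pvPgAux_eq_none
        intro y hy
        exact hgap y (by omega) hy
      have hzj : pvPgZ nums j = -1 := by unfold pvPgZ; rw [hpgj]
      rw [hzj, hm]

lemma pvBfold (nums : List Int) (j : Nat) (hj : j ≤ nums.length) :
    ∃ p M : List Int,
      (PySem.List.pyRange 0 (j : Int) 1).foldl
        (fun s jj =>
          let (p, M, ans) := s
          let xj := (PySem.List.pyGet? nums jj).getD 0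
          let (g, m) := jumpB nums p M xj nums.length (jj - 1) 0
          let tj := if g < 0 then (0 : Int) else m + 1
          (p.set jj.toNat g, M.set jj.toNat (if m > tj then m else tj),
            if tj > ans then tj else ans))
        (List.replicate nums.length 0, List.replicate nums.length 0, 0)
      = (p, M, pvMaxd nums 0 j) ∧ pvInvB nums p M j := by
  induction j with
  | zero =>
    refine ⟨List.replicate nums.length 0, List.replicate nums.length 0, ?_, ?_⟩
    · rw [PySem.List.pyRange_one_eq_nil (by omega)]
      simp [pvMaxd_empty nums (le_refl 0)]
    · refine ⟨by simp, by simp, ?_, ?_⟩ <;> (intro k hk; omega)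
  | succ j ih =>
    obtain ⟨p, M, hfold, hinv⟩ := ih (by omega)
    have hjn : j < nums.length := by omega
    have hcast : ((j + 1 : Nat) : Int) = (j : Int) + 1 := by push_cast; ring
    rw [hcast, PySem.List.pyRange_one_succ_right (by omega), List.foldl_append, hfold]
    simp only [List.foldl_cons, List.foldl_nil]
    have hxj : (PySem.List.pyGet? nums (j : Int)).getD 0 = pvVal nums j := by
      rw [pvGet0 nums _ (by omega)]
      simp [pvVal]
    have hjump : jumpB nums p M ((PySem.List.pyGet? nums (j : Int)).getD 0) nums.length
        ((j : Int) - 1) 0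
        = (pvPgZ nums j, pvMaxd nums (pvPgZ nums j + 1).toNat j) := by
      rw [hxj]
      apply jumpB_spec nums p M j hjn hinv nums.length ((j : Int) - 1) 0 (by omega) (by omega)
        (by omega)
      · intro y hy1 hy2; omega
      · rw [pvMaxd_empty nums (by omega)]
    obtain ⟨hp, hM, hpv, hMv⟩ := hinv
    have hzlb := pvPgZ_lb nums j
    have hzlt := pvPgZ_lt nums j
    obtain ⟨z, hz⟩ : ∃ z, pvPgZ nums j = z := ⟨_, rfl⟩
    rw [hz] at hjump hzlb hzlt
    have htj : (if z < 0 then (0 : Int) else pvMaxd nums (z + 1).toNat j + 1) = pvDth nums j := by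
      rw [pvDth_eq]
      rcases hpg : pvPg nums j with _ | g
      · have : z = -1 := by rw [← hz]; unfold pvPgZ; rw [hpg]
        subst this; simp
      · have hzg : z = (g : Int) := by rw [← hz]; unfold pvPgZ; rw [hpg]
        rw [if_neg (by omega)]
        have : (z + 1).toNat = g + 1 := by omega
        rw [this, add_comm]
    have hd0 := pvDth_nonneg nums j
    have hq0 := pvMaxd_nonneg nums (z + 1).toNat j
    have hm0 := pvMaxd_nonneg nums 0 j
    refine ⟨p.set j z,
      M.set j (if pvMaxd nums (z + 1).toNat j >
            (if z < 0 then (0 : Int) else pvMaxd nums (z + 1).toNat j + 1)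
          then pvMaxd nums (z + 1).toNat j
          else (if z < 0 then (0 : Int) else pvMaxd nums (z + 1).toNat j + 1)),
      ?_, ?_, ?_, ?_, ?_⟩
    · simp only [hjump]
      rw [Int.toNat_natCast]
      simp only [Prod.mk.injEq]
      refine ⟨trivial, trivial, ?_⟩
      rw [htj, pvMaxd_succ_right nums (show (0:Nat) ≤ j by omega)]
      split_ifs <;> omega
    · rw [List.length_set]; exact hp
    · rw [List.length_set]; exact hM
    · intro k hk
      rw [pvGetD_set p j k z 0 (by omega)]
      by_cases hkj : k = j
      · subst hkj; rw [if_pos rfl, ← hz]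
      · rw [if_neg hkj]; exact hpv k (by omega)
    · intro k hk
      rw [pvGetD_set M j k _ 0 (by omega)]
      by_cases hkj : k = j
      · subst hkj
        rw [if_pos rfl, ← hz]
        have hnat : (pvPgZ nums k + 1).toNat ≤ k := by omega
        rw [pvMaxd_succ_right nums hnat, hz, htj]
        rw [max_def]
        split_ifs <;> omega
      · rw [if_neg hkj]; exact hMv k (by omega)

theorem totalSteps_alt_eq (nums : List Int) :
    totalSteps_alt nums = pvMaxd nums 0 nums.length := by
  obtain ⟨p, M, hfold, _⟩ := pvBfold nums nums.length (le_refl _)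
  simp only [totalSteps_alt]
  rw [hfold]

-- ===== A-side development =====
def popN (nums : List Int) (x : Int) : List (Nat × Int) → Int → (List (Nat × Int) × Int)
  | [], cur => ([], cur)
  | (s, v) :: st, cur =>
    if pvVal nums s < x then popN nums x st (max (cur + 1) v) else ((s, v) :: st, cur)

def stepN (nums : List Int) (i : Nat) (st : List (Nat × Int)) (res : Int) :
    (List (Nat × Int) × Int) :=
  let r := popN nums (pvVal nums i) st 0
  ((i, r.2) :: r.1, max res r.2)

def goA (nums : List Int) : Nat → (List (Nat × Int) × Int)
  | 0 => ([], 0)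
  | k + 1 =>
    let s := goA nums k
    stepN nums (nums.length - (k + 1)) s.1 s.2

-- boundary: index of the top entry, or length for the empty stack
def pvB (nums : List Int) : List (Nat × Int) → Nat
  | [] => nums.length
  | (s, _) :: _ => s

-- well-formed stack (top first): indices increasing, values non-decreasing upward,
-- each entry covers the gap up to the next entry with its stored maximum
def GoodS (nums : List Int) : List (Nat × Int) → Prop
  | [] => True
  | (s, v) :: rest =>
      s < nums.length ∧
      s < pvB nums rest ∧
      (∀ y : Nat, s < y → y < pvB nums rest → pvVal nums y < pvVal nums s) ∧
      (pvB nums rest < nums.length → pvVal nums s ≤ pvVal nums (pvB nums rest)) ∧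
      v = pvMaxd nums (s + 1) (pvB nums rest) ∧
      GoodS nums rest

lemma pvB_le_mem (nums : List Int) : ∀ st, GoodS nums st → ∀ e ∈ st, pvB nums st ≤ e.1 := by
  intro st
  induction st with
  | nil => intro _ e he; simp at he
  | cons a rest ih =>
    obtain ⟨s, v⟩ := a
    intro hg e he
    obtain ⟨_, hlt, _, _, _, hgr⟩ := hg
    rcases List.mem_cons.mp he with h | h
    · subst h; simp [pvB]
    · have := ih hgr e h
      simp only [pvB]
      omega

lemma GoodS_head_le (nums : List Int) : ∀ st s v, GoodS nums ((s, v) :: st) →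
    ∀ e ∈ st, pvVal nums s ≤ pvVal nums e.1 := by
  intro st
  induction st with
  | nil => intro s v _ e he; simp at he
  | cons a rest ih =>
    obtain ⟨s', v'⟩ := a
    intro s v hg e he
    obtain ⟨hsn, hlt, hgap, hch, hv, hgr⟩ := hg
    have hs' : pvVal nums s ≤ pvVal nums s' := by
      apply hch
      exact hgr.1
    rcases List.mem_cons.mp he with h | h
    · subst h; exact hs'
    · exact le_trans hs' (ih s' v' hgr e h)

-- all of [pvB st, e.1) is ≤ val e.1, for e in a good stack
lemma GoodS_chain_all (nums : List Int) : ∀ st, GoodS nums st →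
    ∀ e ∈ st, ∀ y : Nat, pvB nums st ≤ y → y < e.1 → pvVal nums y ≤ pvVal nums e.1 := by
  intro st
  induction st with
  | nil => intro _ e he; simp at he
  | cons a rest ih =>
    obtain ⟨s, v⟩ := a
    intro hg e he y hy1 hy2
    obtain ⟨hsn, hlt, hgap, hch, hv, hgr⟩ := hg
    simp only [pvB] at hy1
    rcases List.mem_cons.mp he with h | h
    · subst h; simp at hy2; omega
    · have hse := GoodS_head_le nums rest s v ⟨hsn, hlt, hgap, hch, hv, hgr⟩ e h
      rcases Nat.eq_or_lt_of_le hy1 with h1 | h1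
      · rw [← h1]; exact hse
      · rcases Nat.lt_or_ge y (pvB nums rest) with h2 | h2
        · exact le_trans (le_of_lt (hgap y h1 h2)) hse
        · exact ih hgr e h y h2 hy2

-- running max with a nonnegative seed
lemma pvFm_init (l : List Int) : ∀ i : Int, 0 ≤ i →
    l.foldl max i = max i (l.foldl max 0) := by
  induction l with
  | nil => intro i hi; simp; omega
  | cons c t ih =>
    intro i hi
    simp only [List.foldl_cons]
    rw [ih (max i c) (by omega), ih (max 0 c) (by omega)]
    omega

lemma pvFm_append (a b : List Int) :
    (a ++ b).foldl max (0 : Int) = max (a.foldl max 0) (b.foldl max 0) := by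
  rw [List.foldl_append]
  exact pvFm_init b _ (PySem.List.le_foldl_max a 0).1

-- the big pop lemma
lemma popN_spec (nums : List Int) (i : Nat) (hi : i < nums.length) :
    ∀ st cur, GoodS nums st →
      (∀ e ∈ st, i < e.1) →
      (∀ y : Nat, i < y → y < pvB nums st → pvVal nums y < pvVal nums i) →
      (pvB nums st < nums.length →
        ∀ y : Nat, i < y → y < pvB nums st → pvVal nums y ≤ pvVal nums (pvB nums st)) →
      cur = pvMaxd nums (i + 1) (pvB nums st) →
      GoodS nums (popN nums (pvVal nums i) st cur).1 ∧
      (∃ pre, st = pre ++ (popN nums (pvVal nums i) st cur).1 ∧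
        ∀ e ∈ pre, e.2 ≤ (popN nums (pvVal nums i) st cur).2) ∧
      cur ≤ (popN nums (pvVal nums i) st cur).2 ∧
      (popN nums (pvVal nums i) st cur).2
        = pvMaxd nums (i + 1) (pvB nums (popN nums (pvVal nums i) st cur).1) ∧
      (∀ y : Nat, i < y → y < pvB nums (popN nums (pvVal nums i) st cur).1 →
        pvVal nums y < pvVal nums i) ∧
      (pvB nums (popN nums (pvVal nums i) st cur).1 < nums.length →
        pvVal nums i ≤ pvVal nums (pvB nums (popN nums (pvVal nums i) st cur).1)) ∧
      (∀ e ∈ (popN nums (pvVal nums i) st cur).1, i < e.1) ∧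
      i < pvB nums (popN nums (pvVal nums i) st cur).1 := by
  intro st
  induction st with
  | nil =>
    intro cur _ _ hH1 hH2 hcur
    refine ⟨trivial, ⟨[], by simp [popN], ?_⟩, le_refl _, hcur, hH1,
      by simp only [popN, pvB]; intro h; omega, by simp [popN], ?_⟩
    · intro e he; simp at he
    · simp [popN, pvB]; omega
  | cons a rest ih =>
    obtain ⟨s, v⟩ := a
    intro cur hg hmem hH1 hH2 hcur
    obtain ⟨hsn, hlt, hgap, hch, hv, hgr⟩ := hg
    have his : i < s := hmem (s, v) (by simp)
    simp only [pvB] at hH1 hH2 hcur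
    by_cases hpop : pvVal nums s < pvVal nums i
    · -- pop (s, v)
      have hstep : popN nums (pvVal nums i) ((s, v) :: rest) cur
          = popN nums (pvVal nums i) rest (max (cur + 1) v) := by
        rw [popN, if_pos hpop]
      -- death time of s
      have hpgs : pvPg nums s = some i :=
        pvPgAux_eq_some his hpop (fun y hy1 hy2 => hH2 hsn y hy1 hy2)
      have hdth : pvDth nums s = cur + 1 := by
        rw [pvDth_eq, hpgs]
        show 1 + pvMaxd nums (i + 1) s = cur + 1
        rw [hcur]
        omega
      have hd0 := pvDth_nonneg nums s
      -- new accumulated maximum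
      have hcur2 : max (cur + 1) v = pvMaxd nums (i + 1) (pvB nums rest) := by
        have h1 : pvMaxd nums (i + 1) (pvB nums rest)
            = max (pvMaxd nums (i + 1) s) (pvMaxd nums s (pvB nums rest)) :=
          pvMaxd_split nums (by omega) (by omega)
        have h2 : pvMaxd nums s (pvB nums rest)
            = max (pvMaxd nums s (s + 1)) (pvMaxd nums (s + 1) (pvB nums rest)) :=
          pvMaxd_split nums (by omega) (by omega)
        have h3 : pvMaxd nums s (s + 1) = pvDth nums s := by
          rw [pvMaxd_succ_right nums (le_refl s), pvMaxd_empty nums (le_refl s)]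
          omega
        have hv0 := pvMaxd_nonneg nums (s + 1) (pvB nums rest)
        rw [h1, h2, h3, hdth, ← hv, ← hcur]
        omega
      have hreq :=
        ih (max (cur + 1) v) hgr
          (fun e he => lt_trans his (by have := pvB_le_mem nums rest hgr e he; omega))
          (fun y hy1 hy2 => by
            rcases Nat.lt_or_ge y s with h | h
            · exact hH1 y hy1 h
            · rcases Nat.eq_or_lt_of_le h with h' | h'
              · rw [← h']; exact hpop
              · exact lt_trans (hgap y h' hy2) hpop)
          (fun hbn y hy1 hy2 => by
            have hsb : pvVal nums s ≤ pvVal nums (pvB nums rest) := hch hbn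
            rcases Nat.lt_or_ge y s with h | h
            · exact le_trans (hH2 hsn y hy1 h) hsb
            · rcases Nat.eq_or_lt_of_le h with h' | h'
              · rw [← h']; exact hsb
              · exact le_trans (le_of_lt (hgap y h' hy2)) hsb)
          hcur2
      rw [hstep]
      obtain ⟨g1, ⟨pre, hpre, hprele⟩, g3, g4, g5, g6, g7, g8⟩ := hreq
      refine ⟨g1, ⟨(s, v) :: pre, by rw [List.cons_append, ← hpre], ?_⟩, by omega, g4, g5, g6, g7, g8⟩
      intro e he
      rcases List.mem_cons.mp he with h | h
      · subst h
        have hvle : v ≤ max (cur + 1) v := le_max_right _ _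
        simp only
        omega
      · exact hprele e h
    · -- stop
      have hstep : popN nums (pvVal nums i) ((s, v) :: rest) cur = ((s, v) :: rest, cur) := by
        rw [popN, if_neg hpop]
      rw [hstep]
      refine ⟨⟨hsn, hlt, hgap, hch, hv, hgr⟩, ⟨[], by simp, by intro e he; simp at he⟩,
        le_refl _, by simp only [pvB]; exact hcur, ?_, ?_, hmem, by simp [pvB]; omega⟩
      · intro y hy1 hy2; exact hH1 y hy1 hy2
      · intro _; simp only [pvB]; omega

lemma pvFm_le (l : List Int) (c : Int) (h : ∀ x ∈ l, x ≤ c) :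
    l.foldl max 0 ≤ max 0 c := by
  induction l with
  | nil => simp
  | cons a t ih =>
    simp only [List.foldl_cons]
    rw [pvFm_init t (max 0 a) (by omega)]
    have ha := h a (by simp)
    have ht := ih (fun x hx => h x (by simp [hx]))
    omega

def pvInvA (nums : List Int) (k : Nat) (st : List (Nat × Int)) (res : Int) : Prop :=
  GoodS nums st ∧
  (st = [] ↔ k = 0) ∧
  (∀ s v rest, st = (s, v) :: rest → s = nums.length - k) ∧
  res = (st.map Prod.snd).foldl max 0

lemma pvStep_inv (nums : List Int) (k : Nat) (hk : k < nums.length) (st : List (Nat × Int))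
    (res : Int) (hinv : pvInvA nums k st res) :
    pvInvA nums (k + 1) (stepN nums (nums.length - (k + 1)) st res).1
      (stepN nums (nums.length - (k + 1)) st res).2 := by
  obtain ⟨hg, hemp, hhead, hres⟩ := hinv
  set i := nums.length - (k + 1) with hidef
  have hi : i < nums.length := by omega
  have hB : pvB nums st = i + 1 := by
    rcases st with _ | ⟨⟨s, v⟩, rest⟩
    · simp only [pvB]
      have := hemp.mp rfl
      omega
    · simp only [pvB]
      have := hhead s v rest rfl
      have : s = nums.length - k := this
      have hk0 : k ≠ 0 := by
        intro h
        have := hemp.mpr h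
        simp at this
      omega
  have hmem : ∀ e ∈ st, i < e.1 := by
    intro e he
    have := pvB_le_mem nums st hg e he
    omega
  have hpop := popN_spec nums i hi st 0 hg hmem
    (by rw [hB]; intro y h1 h2; omega)
    (by rw [hB]; intro _ y h1 h2; omega)
    (by rw [hB, pvMaxd_empty nums (le_refl _)])
  obtain ⟨g1, ⟨pre, hpre, hprele⟩, g3, g4, g5, g6, g7, g8⟩ := hpop
  set r := popN nums (pvVal nums i) st 0 with hrdef
  refine ⟨⟨hi, g8, g5, g6, g4, g1⟩, ?_, ?_, ?_⟩
  · constructor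
    · intro h; simp [stepN] at h
    · intro h; omega
  · intro s v rest h
    simp only [stepN] at h
    have : s = i := by
      have := congrArg (fun l => l.head?) h
      simp at this
      exact this.1.symm
    omega
  · have hr2 : (0 : Int) ≤ r.2 := g3
    have h2 : st.map Prod.snd = pre.map Prod.snd ++ r.1.map Prod.snd := by
      rw [hpre, List.map_append]
    have h3 := pvFm_append (pre.map Prod.snd) (r.1.map Prod.snd)
    have h4 : (pre.map Prod.snd).foldl max 0 ≤ max 0 r.2 := by
      apply pvFm_le
      intro x hx
      obtain ⟨e, he, hex⟩ := List.mem_map.mp hx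
      rw [← hex]; exact hprele e he
    have h5 : (0 : Int) ≤ (r.1.map Prod.snd).foldl max 0 := (PySem.List.le_foldl_max _ 0).1
    simp only [stepN, List.map_cons]
    rw [← hrdef]
    rw [List.foldl_cons, pvFm_init _ _ (by omega)]
    rw [h2, h3] at hres
    omega

lemma pvGoA_inv (nums : List Int) : ∀ k, k ≤ nums.length →
    pvInvA nums k (goA nums k).1 (goA nums k).2 := by
  intro k
  induction k with
  | zero =>
    intro _
    exact ⟨trivial, by simp [goA], by intro s v rest h; simp [goA] at h, by simp [goA]⟩
  | succ k ih =>
    intro hk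
    exact pvStep_inv nums k (by omega) (goA nums k).1 (goA nums k).2 (ih (by omega))

lemma pvFm_dead (nums : List Int) : ∀ st, GoodS nums st →
    (∀ e ∈ st, pvDth nums e.1 = 0) →
    (st.map Prod.snd).foldl max 0 = pvMaxd nums (pvB nums st) nums.length := by
  intro st
  induction st with
  | nil =>
    intro _ _
    simp [pvB, pvMaxd_empty nums (le_refl _)]
  | cons a rest ih =>
    obtain ⟨s, v⟩ := a
    intro hg hdead
    obtain ⟨hsn, hlt, hgap, hch, hv, hgr⟩ := hg
    have hBr : pvB nums rest ≤ nums.length := by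
      rcases rest with _ | ⟨⟨s', v'⟩, rest'⟩
      · simp [pvB]
      · simp only [pvB]; exact le_of_lt hgr.1
    have hds : pvDth nums s = 0 := hdead (s, v) (by simp)
    have h1 : pvMaxd nums s nums.length
        = max (pvMaxd nums s (s + 1)) (pvMaxd nums (s + 1) nums.length) :=
      pvMaxd_split nums (by omega) (by omega)
    have h2 : pvMaxd nums (s + 1) nums.length
        = max (pvMaxd nums (s + 1) (pvB nums rest)) (pvMaxd nums (pvB nums rest) nums.length) :=
      pvMaxd_split nums (by omega) hBr
    have h3 : pvMaxd nums s (s + 1) = pvDth nums s := by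
      rw [pvMaxd_succ_right nums (le_refl s), pvMaxd_empty nums (le_refl s)]
      have := pvDth_nonneg nums s
      omega
    have h4 := ih hgr (fun e he => hdead e (by simp [he]))
    have hv0 := pvMaxd_nonneg nums (s + 1) (pvB nums rest)
    have hr0 := pvMaxd_nonneg nums (pvB nums rest) nums.length
    simp only [pvB, List.map_cons, List.foldl_cons]
    rw [pvFm_init _ _ (by omega), h4, h1, h2, h3, hds, hv]
    omega

lemma pvGoA_final (nums : List Int) :
    (goA nums nums.length).2 = pvMaxd nums 0 nums.length := by
  obtain ⟨hg, hemp, hhead, hres⟩ := pvGoA_inv nums nums.length (le_refl _)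
  rcases hst : (goA nums nums.length).1 with _ | ⟨⟨s, v⟩, rest⟩
  · rw [hst] at hemp hres
    have hn0 : nums.length = 0 := hemp.mp rfl
    rw [hres, hn0]
    simp [pvMaxd_empty nums (le_refl 0)]
  · rw [hst] at hg hres
    have hs0 : s = 0 := by
      have := hhead s v rest (by rw [hst])
      omega
    have hB : pvB nums ((s, v) :: rest) = 0 := by simp [pvB, hs0]
    have hdead : ∀ e ∈ (s, v) :: rest, pvDth nums e.1 = 0 := by
      intro e he
      have hnone : pvPg nums e.1 = none := by
        apply pvPgAux_eq_none
        intro y hy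
        exact GoodS_chain_all nums _ hg e he y (by omega) hy
      rw [pvDth_eq, hnone]
    rw [hres, pvFm_dead nums _ hg hdead, hB]

-- ---- bridge from the port of A to goA ----
lemma popA_popN (nums : List Int) (x : Int) : ∀ st (cur : Int),
    popA nums x (st.map (fun e => ((e.1 : Int), e.2))) cur
      = ((popN nums x st cur).1.map (fun e => ((e.1 : Int), e.2)),
         (popN nums x st cur).2) := by
  intro st
  induction st with
  | nil => intro cur; simp [popA, popN]
  | cons a rest ih =>
    obtain ⟨s, v⟩ := a
    intro cur
    have hval : (PySem.List.pyGet? nums (s : Int)).getD 0 = pvVal nums s := by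
      rw [PySem.List.pyGet?_natCast]
      simp [pvVal, List.getD_eq_getElem?_getD]
    simp only [List.map_cons, popA, popN, hval]
    by_cases h : pvVal nums s < x
    · rw [if_pos h, if_pos h, ih]
    · rw [if_neg h, if_neg h]
      simp

lemma pvRange_neg_snoc (a b : Int) (h : b < a) :
    PySem.List.pyRange a b (-1) = PySem.List.pyRange a (b + 1) (-1) ++ [b + 1] := by
  rw [PySem.List.pyRange_neg_one_eq_reverse, PySem.List.pyRange_one_cons (by omega),
    List.reverse_cons, PySem.List.pyRange_neg_one_eq_reverse]

lemma pvAfold (nums : List Int) : ∀ k, k ≤ nums.length →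
    (PySem.List.pyRange ((nums.length : Int) - 1) ((nums.length - k : Nat) - 1) (-1)).foldl
      (fun s i =>
        let x := (PySem.List.pyGet? nums i).getD 0
        let (st', cur) := popA nums x s.2 0
        (max s.1 cur, (i, cur) :: st'))
      (0, [])
      = ((goA nums k).2, (goA nums k).1.map (fun e => ((e.1 : Int), e.2))) := by
  intro k
  induction k with
  | zero =>
    intro _
    rw [PySem.List.pyRange_neg_one_eq_nil (by omega)]
    simp [goA]
  | succ k ih =>
    intro hk
    have hb : ((nums.length - (k + 1) : Nat) : Int) - 1 < (nums.length : Int) - 1 := by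
      have : (nums.length - (k + 1) : Nat) < nums.length := by omega
      omega
    rw [pvRange_neg_snoc _ _ hb, List.foldl_append, ]
    have hcast : ((nums.length - (k + 1) : Nat) : Int) - 1 + 1 = ((nums.length - (k + 1) : Nat) : Int) := by omega
    have hcast2 : ((nums.length - (k + 1) : Nat) : Int) = ((nums.length - k : Nat) : Int) - 1 := by
      omega
    rw [hcast, hcast2, ih (by omega)]
    simp only [List.foldl_cons, List.foldl_nil]
    have hx : (PySem.List.pyGet? nums (((nums.length - k : Nat) : Int) - 1)).getD 0
        = pvVal nums (nums.length - (k + 1)) := by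
      rw [← hcast2, PySem.List.pyGet?_natCast]
      simp [pvVal, List.getD_eq_getElem?_getD]
    rw [hx, popA_popN nums _ (goA nums k).1 0]
    show (_, _) = _
    rw [← hcast2]
    rfl

theorem totalSteps_eq (nums : List Int) :
    totalSteps nums = pvMaxd nums 0 nums.length := by
  simp only [totalSteps]
  have h0 : ((nums.length - nums.length : Nat) : Int) - 1 = -1 := by
    simp
  have := pvAfold nums nums.length (le_refl _)
  rw [h0] at this
  rw [this, pvGoA_final]

-- ===== VERDICT (by name: the statement is the Claim_ definition above) =====
theorem totalSteps_spec : Claim_equal_totalSteps := by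
  intro nums _
  unfold Spec_totalSteps
  rw [totalSteps_eq, totalSteps_alt_eq]
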